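-- pv_equiv track=rewrite | github.com/KDGehlot2003/CP | A_Strong_Password.py | maximize_typing_time
-- ===== SOURCE A (Python) =====
-- def calculate_typing_time(s):
--     time = 2
--     for i in range(1, len(s)):
--         if s[i] == s[i - 1]:
--             time += 1
--         else:
--             time += 2
--     return time
--
-- def maximize_typing_time(t, test_cases):
--     results = []
--     for s in test_cases:
--         max_time = 0
--         best_string = ""
--         for i in range(len(s) + 1):
--             for char in 'abcdefghijklmnopqrstuvwxyz':
--                 new_s = s[:i] + char + s[i:]
--                 current_time = calculate_typing_time(new_s)
--                 if current_time > max_time: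
--                     max_time = current_time
--                     best_string = new_s
--         results.append(best_string)
--     return results
-- ===== SOURCE B (Python) =====
-- def maximize_typing_time(t, test_cases):
--     results = []
--     for s in test_cases:
--         m = len(s)
--         base = 2 + sum(1 if s[k] == s[k - 1] else 2 for k in range(1, m))
--         best_val, best_i, best_c = -1, 0, 'a'
--         for i in range(m + 1):
--             removed = (1 if s[i - 1] == s[i] else 2) if 0 < i < m else 0
--             for c in 'abcdefghijklmnopqrstuvwxyz':
--                 d = -removed
--                 if i > 0:
--                     d += 1 if s[i - 1] == c else 2
--                 if i < m:
--                     d += 1 if c == s[i] else 2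
--                 if base + d > best_val:
--                     best_val, best_i, best_c = base + d, i, c
--         results.append(s[:best_i] + best_c + s[best_i:])
--     return results
-- ===== Notes on version B (the rewrite author's own statement) =====
-- stated objective: faster
-- what changed: Instead of rebuilding each of the 26*(n+1) candidate strings and retyping it in O(n), B computes the base typing time once and evaluates every insertion as an O(1) delta (new adjacent pairs minus the removed pair), keeping the first strict maximum and building the winning string once.
import Mathlib
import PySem

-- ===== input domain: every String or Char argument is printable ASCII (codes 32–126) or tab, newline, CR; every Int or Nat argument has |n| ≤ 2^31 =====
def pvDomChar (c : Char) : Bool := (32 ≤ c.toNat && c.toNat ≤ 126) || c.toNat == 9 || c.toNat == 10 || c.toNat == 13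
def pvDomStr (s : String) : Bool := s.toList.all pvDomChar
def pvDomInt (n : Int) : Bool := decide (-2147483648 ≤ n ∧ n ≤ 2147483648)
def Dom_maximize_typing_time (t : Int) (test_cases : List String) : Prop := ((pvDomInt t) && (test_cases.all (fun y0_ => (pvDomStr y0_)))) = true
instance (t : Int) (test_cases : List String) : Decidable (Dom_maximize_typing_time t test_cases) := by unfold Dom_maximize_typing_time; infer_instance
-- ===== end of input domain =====

-- B replaces A's per-candidate retyping of the whole inserted string by a precomputed base
-- time plus a per-(position,char) insertion delta; objective: faster.


-- ===== PORT A =====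
-- 'abcdefghijklmnopqrstuvwxyz', the list of characters the char loops iterate over
def pvAlphabet : List Char :=
  ['a','b','c','d','e','f','g','h','i','j','k','l','m','n','o','p','q','r','s','t','u','v','w','x','y','z']

-- s[:i] + char + s[i:]
def pvInsert (sl : List Char) (i : Int) (ch : Char) : List Char :=
  PySem.List.slice sl none (some i) ++ [ch] ++ PySem.List.slice sl (some i) none

def calculate_typing_time (s : List Char) : Int :=
  (PySem.List.pyRange 1 (s.length : Int) 1).foldl
    (fun time i =>
      if PySem.List.pyGet? s i = PySem.List.pyGet? s (i - 1) then time + 1 else time + 2) 2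

-- body of A's inner 'for char in …' loop: retype the whole candidate string
def pvStepA (sl : List Char) (i : Int) (st : Int × List Char) (ch : Char) : Int × List Char :=
  let new_s := pvInsert sl i ch
  let current_time := calculate_typing_time new_s
  if current_time > st.1 then (current_time, new_s) else st

-- one test case of A
def pvCaseA (s : String) : String :=
  let sl := s.toList
  let st := (PySem.List.pyRange 0 ((sl.length : Int) + 1) 1).foldl
    (fun st i => pvAlphabet.foldl (pvStepA sl i) st) ((0 : Int), ([] : List Char))
  String.ofList st.2

def maximize_typing_time (t : Int) (test_cases : List String) : List String :=
  test_cases.foldl (fun results s => results ++ [pvCaseA s]) []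

-- ===== PORT B =====
-- base = 2 + sum(1 if s[k]==s[k-1] else 2 for k in range(1, m))
def pvBase (sl : List Char) : Int :=
  2 + (PySem.List.pyRange 1 (sl.length : Int) 1).foldl
    (fun acc k =>
      acc + (if PySem.List.pyGet? sl k = PySem.List.pyGet? sl (k - 1) then 1 else 2)) 0

-- removed = (1 if s[i-1]==s[i] else 2) if 0 < i < m else 0
def pvRemoved (sl : List Char) (i : Int) : Int :=
  if 0 < i ∧ i < (sl.length : Int) then
    (if PySem.List.pyGet? sl (i - 1) = PySem.List.pyGet? sl i then 1 else 2) else 0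

-- body of B's inner 'for c in …' loop: O(1) insertion delta, keep first strict max
def pvStepB (sl : List Char) (base : Int) (i : Int) (removed : Int)
    (st : Int × Int × Char) (c : Char) : Int × Int × Char :=
  let d1 : Int := -removed
  let d2 : Int := d1 + (if 0 < i then (if PySem.List.pyGet? sl (i - 1) = some c then 1 else 2) else 0)
  let d : Int := d2 + (if i < (sl.length : Int) then (if some c = PySem.List.pyGet? sl i then 1 else 2) else 0)
  if base + d > st.1 then (base + d, i, c) else st

-- body of B's outer 'for i in range(m + 1)' loop
def pvOuterB (sl : List Char) (base : Int) (st : Int × Int × Char) (i : Int) : Int × Int × Char :=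
  pvAlphabet.foldl (pvStepB sl base i (pvRemoved sl i)) st

-- one test case of B: best (value, position, char), build the string once at the end
def pvCaseB (s : String) : String :=
  let sl := s.toList
  let base := pvBase sl
  let st := (PySem.List.pyRange 0 ((sl.length : Int) + 1) 1).foldl
    (pvOuterB sl base) ((-1 : Int), (0 : Int), 'a')
  String.ofList (pvInsert sl st.2.1 st.2.2)

def maximize_typing_time_alt (t : Int) (test_cases : List String) : List String :=
  test_cases.foldl (fun results s => results ++ [pvCaseB s]) []

-- ===== PRECONDITION & SPEC =====
def Spec_maximize_typing_time (t : Int) (test_cases : List String) (out : List String) : Prop := out = maximize_typing_time_alt t test_cases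
instance (t : Int) (test_cases : List String) (out : List String) : Decidable (Spec_maximize_typing_time t test_cases out) := by unfold Spec_maximize_typing_time; infer_instance

-- ===== CLAIM (what is proved, stated in full; the proofs are below) =====
def Claim_equal_maximize_typing_time : Prop := ∀ (t : Int) (test_cases : List String), Dom_maximize_typing_time t test_cases → Spec_maximize_typing_time t test_cases (maximize_typing_time t test_cases)

-- ===== LEMMAS AND PROOFS =====

-- cost of typing `cur` right after `prev` (A's comparison order: s[i] == s[i-1])
def pvCost (p q : Char) : Int := if q = p then 1 else 2

-- sum of adjacent-pair costs; calculate_typing_time = 2 + pvPairSum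
def pvPairSum : List Char → Int
  | [] => 0
  | [_] => 0
  | a :: b :: r => pvCost a b + pvPairSum (b :: r)

-- change of pvPairSum when `c` is inserted at position j
def pvDeltaSpec (l : List Char) (j : Nat) (c : Char) : Int :=
  (if 0 < j then pvCost (l.getD (j - 1) 'a') c else 0)
  + (if j < l.length then pvCost c (l.getD j 'a') else 0)
  - (if 0 < j ∧ j < l.length then pvCost (l.getD (j - 1) 'a') (l.getD j 'a') else 0)

theorem pvCost_pos (p q : Char) : 0 < pvCost p q := by
  unfold pvCost; split <;> norm_num

theorem pvPairSum_nonneg (l : List Char) : 0 ≤ pvPairSum l := by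
  induction l with
  | nil => simp [pvPairSum]
  | cons a r ih =>
    cases r with
    | nil => simp [pvPairSum]
    | cons b r' =>
      have := pvCost_pos a b
      simp only [pvPairSum] at *
      omega

theorem pvPairSum_cons (a : Char) (X : List Char) (h : X ≠ []) :
    pvPairSum (a :: X) = pvCost a (X.headD 'a') + pvPairSum X := by
  cases X with
  | nil => exact absurd rfl h
  | cons b r => simp [pvPairSum]

theorem pvPairSum_snoc (l : List Char) (x : Char) (h : l ≠ []) :
    pvPairSum (l ++ [x]) = pvPairSum l + pvCost (l.getD (l.length - 1) 'a') x := by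
  induction l with
  | nil => exact absurd rfl h
  | cons a r ih =>
    cases r with
    | nil => simp [pvPairSum]
    | cons b r' =>
      have hr : (b :: r') ≠ [] := by simp
      have e1 : (a :: b :: r') ++ [x] = a :: ((b :: r') ++ [x]) := by simp
      rw [e1, pvPairSum_cons _ _ (by simp), ih hr, pvPairSum_cons a (b :: r') hr]
      have e2 : (((b :: r') ++ [x]).headD 'a') = ((b :: r').headD 'a') := by simp
      have e3 : (a :: b :: r').getD ((a :: b :: r').length - 1) 'a'
           = (b :: r').getD ((b :: r').length - 1) 'a' := by
        simp [List.getD]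
        rfl
      rw [e2, e3]; ring

theorem pvFoldlTime (l : List Char) (a : Int) :
    (PySem.List.pyRange 1 (l.length : Int) 1).foldl
      (fun acc k => acc + (if PySem.List.pyGet? l k = PySem.List.pyGet? l (k - 1) then (1:Int) else 2)) a
    = a + pvPairSum l := by
  induction l using List.reverseRecOn generalizing a with
  | nil => simp [PySem.List.pyRange_one_eq_nil, pvPairSum]
  | append_singleton l x ih =>
    rcases eq_or_ne l [] with rfl | hl
    · have : PySem.List.pyRange 1 (([x] : List Char).length : Int) 1 = [] :=
        PySem.List.pyRange_one_eq_nil (by simp)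
      simp only [List.nil_append] at this ⊢
      rw [this]; simp [pvPairSum]
    · have hn : 1 ≤ (l.length : Int) := by
        have := List.length_pos_iff.mpr hl; omega
      have hlen : ((l ++ [x]).length : Int) = (l.length : Int) + 1 := by simp
      rw [hlen, PySem.List.pyRange_one_succ_right (by omega), List.foldl_append]
      have hcongr : (PySem.List.pyRange 1 (l.length : Int) 1).foldl
          (fun acc k => acc + (if PySem.List.pyGet? (l ++ [x]) k = PySem.List.pyGet? (l ++ [x]) (k - 1) then (1:Int) else 2)) a
        = (PySem.List.pyRange 1 (l.length : Int) 1).foldl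
          (fun acc k => acc + (if PySem.List.pyGet? l k = PySem.List.pyGet? l (k - 1) then (1:Int) else 2)) a := by
        apply PySem.List.foldl_congr_mem
        intro acc k hk
        rw [PySem.List.mem_pyRange_one] at hk
        obtain ⟨j, rfl⟩ : ∃ j : Nat, k = (j : Int) := ⟨k.toNat, by omega⟩
        have hj1 : ((j : Int) - 1) = ((j - 1 : Nat) : Int) := by omega
        have hkl : j < l.length := by omega
        have hkl1 : j - 1 < l.length := by omega
        rw [hj1]
        simp only [PySem.List.pyGet?_natCast]
        rw [List.getElem?_append_left hkl, List.getElem?_append_left hkl1]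
      rw [hcongr, ih]
      have e1 : PySem.List.pyGet? (l ++ [x]) (l.length : Int) = some x := by
        rw [PySem.List.pyGet?_natCast]
        exact List.getElem?_concat_length
      have e2 : PySem.List.pyGet? (l ++ [x]) ((l.length : Int) - 1) = some (l.getD (l.length - 1) 'a') := by
        have h1 : (l.length : Int) - 1 = ((l.length - 1 : Nat) : Int) := by omega
        have h2 : l.length - 1 < l.length := by omega
        rw [h1, PySem.List.pyGet?_natCast, List.getElem?_append_left h2,
            List.getElem?_eq_getElem h2, List.getD_eq_getElem l 'a' h2]
      simp only [List.foldl_cons, List.foldl_nil]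
      rw [e1, e2, pvPairSum_snoc l x hl]
      simp only [pvCost, Option.some.injEq]
      split <;> ring

theorem pvPairSum_ins (l : List Char) (j : Nat) (c : Char) (h : j ≤ l.length) :
    pvPairSum (l.take j ++ c :: l.drop j) = pvPairSum l + pvDeltaSpec l j c := by
  induction l generalizing j with
  | nil =>
    have hj0 : j = 0 := by simpa using h
    subst hj0
    simp [pvPairSum, pvDeltaSpec]
  | cons a r ih =>
    cases j with
    | zero =>
      cases r with
      | nil => simp [pvPairSum, pvDeltaSpec]
      | cons b r' => simp [pvPairSum, pvDeltaSpec, List.getD]; ring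
    | succ j' =>
      have hj' : j' ≤ r.length := by simpa using h
      have hl : (a :: r).take (j' + 1) ++ c :: (a :: r).drop (j' + 1)
              = a :: (r.take j' ++ c :: r.drop j') := by simp
      rw [hl]
      cases r with
      | nil =>
        have hj0 : j' = 0 := by simpa using hj'
        subst hj0
        simp [pvPairSum, pvDeltaSpec, List.getD]
      | cons b r' =>
        have hne : (b :: r').take j' ++ c :: (b :: r').drop j' ≠ [] := by
          cases j' <;> simp
        rw [pvPairSum_cons _ _ hne, ih _ hj', pvPairSum_cons a (b :: r') (by simp)]
        cases j' with
        | zero =>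
          simp [pvDeltaSpec, List.getD]
          ring
        | succ k =>
          have hd : ((b :: r').take (k + 1) ++ c :: (b :: r').drop (k + 1)).headD 'a' = b := by
            simp
          rw [hd]
          simp only [pvDeltaSpec, List.getD, List.headD]
          simp only [List.length_cons, List.getElem?_cons_succ]
          have c1 : (0 < k + 1 + 1) = True := by simp
          have c2 : (0 < k + 1) = True := by simp
          have c3 : (k + 1 + 1 < r'.length + 1 + 1) = (k + 1 < r'.length + 1) := by
            simp
          simp only [c1, c2, c3, if_true, true_and]
          have e1 : k + 1 - 1 = k := by omega
          have e2 : k + 1 + 1 - 1 = k + 1 := by omega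
          rw [e1, e2]
          simp only [List.getElem?_cons_succ]
          ring

-- an `if a = b` test may be read with the equality flipped
theorem pvIteComm {α : Type} [DecidableEq α] (a b : α) (x y : Int) :
    (if a = b then x else y) = (if b = a then x else y) := by
  by_cases h : a = b
  · simp [h]
  · rw [if_neg h, if_neg (fun hh => h hh.symm)]

theorem pvCalcEq (l : List Char) : calculate_typing_time l = 2 + pvPairSum l := by
  unfold calculate_typing_time
  have : (fun (time : Int) (i : Int) =>
      if PySem.List.pyGet? l i = PySem.List.pyGet? l (i - 1) then time + 1 else time + 2)
    = (fun (acc : Int) (k : Int) =>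
      acc + (if PySem.List.pyGet? l k = PySem.List.pyGet? l (k - 1) then (1:Int) else 2)) := by
    funext acc k; split <;> ring
  rw [this, pvFoldlTime]

theorem pvBaseEq (sl : List Char) : pvBase sl = 2 + pvPairSum sl := by
  unfold pvBase
  rw [pvFoldlTime]
  ring

-- pvInsert at a natural position is take/insert/drop
theorem pvInsert_natCast (sl : List Char) (j : Nat) (ch : Char) :
    pvInsert sl (j : Int) ch = sl.take j ++ ch :: sl.drop j := by
  unfold pvInsert
  rw [PySem.List.slice_to_natCast, PySem.List.slice_from_natCast]
  simp

-- A's candidate value, in closed form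
theorem pvValA (sl : List Char) (j : Nat) (hj : j ≤ sl.length) (ch : Char) :
    calculate_typing_time (pvInsert sl (j : Int) ch) = 2 + pvPairSum sl + pvDeltaSpec sl j ch := by
  rw [pvInsert_natCast, pvCalcEq, pvPairSum_ins sl j ch hj]
  ring

-- B's candidate value equals the same closed form
theorem pvValB (sl : List Char) (j : Nat) (hj : j ≤ sl.length) (c : Char) :
    pvBase sl + ((-pvRemoved sl (j : Int)
      + (if 0 < (j : Int) then (if PySem.List.pyGet? sl ((j : Int) - 1) = some c then 1 else 2) else 0))
      + (if (j : Int) < (sl.length : Int) then (if some c = PySem.List.pyGet? sl (j : Int) then 1 else 2) else 0))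
    = 2 + pvPairSum sl + pvDeltaSpec sl j c := by
  rw [pvBaseEq]
  have hget : ∀ (k : Nat), k < sl.length → PySem.List.pyGet? sl (k : Int) = some (sl.getD k 'a') := by
    intro k hk
    rw [PySem.List.pyGet?_natCast, List.getElem?_eq_getElem hk, List.getD_eq_getElem sl 'a' hk]
  unfold pvRemoved pvDeltaSpec
  by_cases h0 : 0 < j
  · have hj1 : ((j : Int) - 1) = ((j - 1 : Nat) : Int) := by omega
    have hj1l : j - 1 < sl.length := by omega
    by_cases hlt : j < sl.length
    · rw [hj1, hget (j - 1) hj1l, hget j hlt]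
      simp only [if_pos (by exact_mod_cast h0 : (0:Int) < (j:Int)),
        if_pos (by exact_mod_cast hlt : ((j:Int) < (sl.length:Int))),
        if_pos (⟨by exact_mod_cast h0, by exact_mod_cast hlt⟩ : (0:Int) < (j:Int) ∧ (j:Int) < (sl.length:Int)),
        if_pos h0, if_pos hlt, if_pos (⟨h0, hlt⟩ : 0 < j ∧ j < sl.length)]
      simp only [Option.some.injEq, pvCost]
      rw [pvIteComm (sl.getD (j-1) 'a') c, pvIteComm c (sl.getD j 'a') , pvIteComm (sl.getD (j-1) 'a') (sl.getD j 'a')]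
      ring
    · have g1 : (0:Int) < (j:Int) := by exact_mod_cast h0
      have g2 : ¬ ((j:Int) < (sl.length:Int)) := by exact_mod_cast hlt
      rw [hj1, hget (j - 1) hj1l]
      rw [if_pos g1, if_pos h0, if_neg g2, if_neg hlt,
        if_neg (show ¬ (0 < j ∧ j < sl.length) from fun hc => hlt hc.2),
        if_neg (show ¬ ((0:Int) < (j:Int) ∧ (j:Int) < (sl.length:Int)) from fun hc => g2 hc.2)]
      simp only [Option.some.injEq, pvCost]
      rw [pvIteComm (sl.getD (j-1) 'a') c]
      ring
  · have hj0 : j = 0 := by omega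
    subst hj0
    by_cases hlt : 0 < sl.length
    · rw [hget 0 hlt]
      simp only [Nat.cast_zero]
      simp only [if_neg (by norm_num : ¬ (0:Int) < 0), if_neg (by norm_num : ¬ 0 < 0),
        if_neg (fun (hc : (0:Int) < 0 ∧ (0:Int) < (sl.length:Int)) => (by norm_num : ¬ (0:Int) < 0) hc.1),
        if_neg (fun (hc : 0 < 0 ∧ 0 < sl.length) => (by norm_num : ¬ 0 < 0) hc.1),
        if_pos (by exact_mod_cast hlt : (0:Int) < (sl.length:Int)), if_pos hlt]
      simp only [Option.some.injEq, pvCost]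
      rw [pvIteComm c (sl.getD 0 'a')]
      ring
    · have : sl.length = 0 := by omega
      simp [this]

-- relation between A's and B's scan states after at least one update
def pvRel (sl : List Char) (stA : Int × List Char) (stB : Int × Int × Char) : Prop :=
  stA.1 = stB.1 ∧ stA.2 = pvInsert sl stB.2.1 stB.2.2 ∧ 2 ≤ stA.1

theorem pvStep_rel (sl : List Char) (j : Nat) (hj : j ≤ sl.length) (ch : Char)
    (stA : Int × List Char) (stB : Int × Int × Char)
    (hP : pvRel sl stA stB ∨ (stA = ((0:Int), ([] : List Char)) ∧ stB = ((-1:Int), (0:Int), 'a'))) :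
    pvRel sl (pvStepA sl (j : Int) stA ch)
      (pvStepB sl (pvBase sl) (j : Int) (pvRemoved sl (j : Int)) stB ch) := by
  have hv : calculate_typing_time (pvInsert sl (j : Int) ch)
      = pvBase sl + ((-pvRemoved sl (j : Int)
      + (if 0 < (j : Int) then (if PySem.List.pyGet? sl ((j : Int) - 1) = some ch then 1 else 2) else 0))
      + (if (j : Int) < (sl.length : Int) then (if some ch = PySem.List.pyGet? sl (j : Int) then 1 else 2) else 0)) := by
    rw [pvValA sl j hj ch, pvValB sl j hj ch]
  have hv2 : 2 ≤ calculate_typing_time (pvInsert sl (j : Int) ch) := by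
    rw [pvValA sl j hj ch]
    linarith [pvPairSum_ins sl j ch hj, pvPairSum_nonneg (sl.take j ++ ch :: sl.drop j)]
  unfold pvStepA pvStepB
  rcases hP with ⟨h1, h2, h3⟩ | ⟨hA, hB⟩
  · simp only [← hv, h1]
    split
    · exact ⟨rfl, rfl, hv2⟩
    · exact ⟨h1, h2, h3⟩
  · subst hA; subst hB
    simp only [← hv]
    rw [if_pos (by omega : calculate_typing_time (pvInsert sl (j:Int) ch) > (0:Int)),
        if_pos (by omega : calculate_typing_time (pvInsert sl (j:Int) ch) > (-1:Int))]
    exact ⟨rfl, rfl, hv2⟩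

theorem pvFold_rel (sl : List Char) (j : Nat) (hj : j ≤ sl.length) (cs : List Char)
    (stA : Int × List Char) (stB : Int × Int × Char) (h : pvRel sl stA stB) :
    pvRel sl (cs.foldl (pvStepA sl (j : Int)) stA)
      (cs.foldl (pvStepB sl (pvBase sl) (j : Int) (pvRemoved sl (j : Int))) stB) := by
  induction cs generalizing stA stB with
  | nil => exact h
  | cons c rest ih =>
    exact ih _ _ (pvStep_rel sl j hj c stA stB (Or.inl h))

theorem pvOuter_rel (sl : List Char) (j : Nat) (hj : j ≤ sl.length)
    (stA : Int × List Char) (stB : Int × Int × Char)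
    (hP : pvRel sl stA stB ∨ (stA = ((0:Int), ([] : List Char)) ∧ stB = ((-1:Int), (0:Int), 'a'))) :
    pvRel sl (pvAlphabet.foldl (pvStepA sl (j : Int)) stA)
      (pvOuterB sl (pvBase sl) stB (j : Int)) := by
  unfold pvOuterB
  have hne : pvAlphabet ≠ [] := by simp [pvAlphabet]
  obtain ⟨c0, cs, hcs⟩ : ∃ c0 cs, pvAlphabet = c0 :: cs := by
    cases h : pvAlphabet with
    | nil => exact absurd h hne
    | cons c0 cs => exact ⟨c0, cs, rfl⟩
  rw [hcs]
  simp only [List.foldl_cons]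
  exact pvFold_rel sl j hj cs _ _ (pvStep_rel sl j hj c0 stA stB hP)

theorem pvRangeFold_rel (sl : List Char) (L : List Int)
    (hL : ∀ i ∈ L, 0 ≤ i ∧ i ≤ (sl.length : Int))
    (stA : Int × List Char) (stB : Int × Int × Char) (h : pvRel sl stA stB) :
    pvRel sl (L.foldl (fun st i => pvAlphabet.foldl (pvStepA sl i) st) stA)
      (L.foldl (pvOuterB sl (pvBase sl)) stB) := by
  induction L generalizing stA stB with
  | nil => exact h
  | cons i rest ih =>
    have hi := hL i (List.mem_cons_self)
    obtain ⟨j, rfl⟩ : ∃ j : Nat, i = (j : Int) := ⟨i.toNat, by omega⟩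
    have hj : j ≤ sl.length := by exact_mod_cast hi.2
    simp only [List.foldl_cons]
    exact ih (fun i hi => hL i (List.mem_cons_of_mem _ hi)) _ _
      (pvOuter_rel sl j hj stA stB (Or.inl h))

theorem pvCase_eq (s : String) : pvCaseA s = pvCaseB s := by
  show String.ofList ((PySem.List.pyRange 0 ((s.toList.length : Int) + 1) 1).foldl
      (fun st i => pvAlphabet.foldl (pvStepA s.toList i) st) ((0 : Int), ([] : List Char))).2
    = String.ofList (pvInsert s.toList
      (((PySem.List.pyRange 0 ((s.toList.length : Int) + 1) 1).foldl
        (pvOuterB s.toList (pvBase s.toList)) ((-1 : Int), (0 : Int), 'a')).2.1)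
      (((PySem.List.pyRange 0 ((s.toList.length : Int) + 1) 1).foldl
        (pvOuterB s.toList (pvBase s.toList)) ((-1 : Int), (0 : Int), 'a')).2.2))
  have hsplit : PySem.List.pyRange 0 ((s.toList.length : Int) + 1) 1
      = (0 : Int) :: PySem.List.pyRange 1 ((s.toList.length : Int) + 1) 1 := by
    rw [PySem.List.pyRange_one_cons (by omega)]
    norm_num
  rw [hsplit]
  simp only [List.foldl_cons]
  have h0 : pvRel s.toList
      (pvAlphabet.foldl (pvStepA s.toList (0 : Int)) ((0:Int), ([] : List Char)))
      (pvOuterB s.toList (pvBase s.toList) ((-1:Int), (0:Int), 'a') (0 : Int)) := by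
    have := pvOuter_rel s.toList 0 (by omega) ((0:Int), ([] : List Char)) ((-1:Int), (0:Int), 'a')
      (Or.inr ⟨rfl, rfl⟩)
    simpa using this
  have hrest := pvRangeFold_rel s.toList (PySem.List.pyRange 1 ((s.toList.length : Int) + 1) 1)
    (by
      intro i hi
      rw [PySem.List.mem_pyRange_one] at hi
      omega) _ _ h0
  rw [hrest.2.1]

-- ===== VERDICT (by name: the statement is the Claim_ definition above) =====
theorem maximize_typing_time_spec : Claim_equal_maximize_typing_time := by
  intro t test_cases _
  unfold Spec_maximize_typing_time maximize_typing_time maximize_typing_time_alt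
  rw [PySem.List.foldl_append_singleton_eq_map, PySem.List.foldl_append_singleton_eq_map]
  simp only [List.nil_append]
  exact List.map_congr_left fun s _ => pvCase_eq s
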